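-- pv_equiv track=rewrite | github.com/KhantsevaAA/ITAM.Python | hm_chapter-3/hm_test_2A.py | termary
-- ===== SOURCE A (Python) =====
-- def termary(num):
--     out = 0
--     n = 0
--     while num != 0:
--         out += ((num % 10) * (3 ** n))
--         num = num // 10
--         n += 1
--     return out
-- ===== SOURCE B (Python) =====
-- def termary(num):
--     out = 0
--     for c in str(num):
--         out = out * 3 + int(c)
--     return out
-- ===== Notes on version B (the rewrite author's own statement) =====
-- stated objective: idiomatic
-- what changed: Replaces the %10//10 loop that sums digit*3**n from the least-significant end with Horner's method over str(num), traversing digits most-significant-first with a single running accumulator and no power computation.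
import Mathlib
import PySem

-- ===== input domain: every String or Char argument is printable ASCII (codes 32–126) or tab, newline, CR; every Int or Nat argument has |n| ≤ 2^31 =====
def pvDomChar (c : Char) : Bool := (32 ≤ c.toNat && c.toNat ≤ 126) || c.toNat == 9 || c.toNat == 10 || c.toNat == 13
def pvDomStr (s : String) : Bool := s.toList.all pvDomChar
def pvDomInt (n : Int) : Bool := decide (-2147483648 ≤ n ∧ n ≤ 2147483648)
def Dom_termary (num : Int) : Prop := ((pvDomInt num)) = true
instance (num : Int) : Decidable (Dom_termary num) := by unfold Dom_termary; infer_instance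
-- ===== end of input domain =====

-- B replaces the %10//10 loop summing digit*3**n (least-significant-first) with Horner's method
-- over str(num), most-significant-first with one running accumulator (objective: idiomatic).


-- ===== PORT A =====
-- the while loop; for num < 0 Python never terminates (outside Pre_), so that branch is a
-- totality guard only
def termaryLoop (num out n : Int) : Int :=
  if _h0 : num = 0 then out
  else if _hneg : num < 0 then out  -- Python diverges here; excluded by Pre_
  else termaryLoop (PySem.Int.floordiv num 10)
        (out + (PySem.Int.mod num 10) * 3 ^ n.toNat) (n + 1)
termination_by num.toNat
decreasing_by
  have hpos : 0 < num := by omega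
  rw [PySem.Int.floordiv_eq_ediv_of_pos (by norm_num)]
  omega

def termary (num : Int) : Int := termaryLoop num 0 0

-- ===== PORT B =====
-- Horner over str(num); int(c) is c.toNat - 48, exact on the digit characters str(num)
-- produces for num ≥ 0 (Pre_)
def termary_alt (num : Int) : Int :=
  (PySem.Int.toChars num).foldl (fun out c => out * 3 + ((c.toNat : Int) - 48)) 0

-- ===== PRECONDITION & SPEC =====
-- Pre_ excludes num < 0: there A's while loop never terminates (num//10 stalls at -1),
-- so A returns no value (and B raises ValueError on int('-')).
def Pre_termary (num : Int) : Prop := 0 ≤ num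
instance (num : Int) : Decidable (Pre_termary num) := by unfold Pre_termary; infer_instance
def pvWitness_termary : Int := (12)
def Spec_termary (num : Int) (out : Int) : Prop := out = termary_alt num
instance (num : Int) (out : Int) : Decidable (Spec_termary num out) := by unfold Spec_termary; infer_instance

-- ===== CLAIM (what is proved, stated in full; the proofs are below) =====
def Claim_equal_termary : Prop := ∀ (num : Int), Dom_termary num → Pre_termary num → Spec_termary num (termary num)

-- ===== LEMMAS AND PROOFS =====

-- the base-3 value of the decimal digits of n (Horner form)
def pvV (n : Nat) : Int :=
  if n = 0 then 0 else pvV (n / 10) * 3 + (n % 10 : Nat)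
decreasing_by exact Nat.div_lt_self (by omega) (by norm_num)

-- number of decimal digits of n (≥ 1, counting 0 as one digit)
def pvLen (n : Nat) : Nat :=
  if n < 10 then 1 else pvLen (n / 10) + 1
decreasing_by exact Nat.div_lt_self (by omega) (by norm_num)

lemma pvLen_lt_ten {n : Nat} (h : n < 10) : pvLen n = 1 := by
  rw [pvLen, if_pos h]

lemma pvLen_step {n : Nat} (h : ¬ n < 10) : pvLen n = pvLen (n / 10) + 1 := by
  rw [pvLen, if_neg h]

lemma pvV_lt_ten {n : Nat} (h : n < 10) : pvV n = n := by
  rw [pvV]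
  rcases Nat.eq_zero_or_pos n with h0 | h0
  · simp [h0]
  · rw [if_neg (by omega), pvV, if_pos (by omega)]
    simp [Nat.mod_eq_of_lt h]

lemma pvV_step {n : Nat} (h : n ≠ 0) : pvV n = pvV (n / 10) * 3 + (n % 10 : Nat) := by
  rw [pvV, if_neg h]

lemma digitChar_val {d : Nat} (h : d < 10) :
    ((Nat.digitChar d).toNat : Int) - 48 = d := by
  interval_cases d <;> decide

lemma foldl_toDigitsCore (f : Nat) :
    ∀ (n : Nat) (acc : List Char) (a : Int), n < f →
    List.foldl (fun out c => out * 3 + ((c.toNat : Int) - 48)) a (Nat.toDigitsCore 10 f n acc)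
      = List.foldl (fun out c => out * 3 + ((c.toNat : Int) - 48))
          (a * 3 ^ pvLen n + pvV n) acc := by
  induction f with
  | zero => intro n acc a h; omega
  | succ f ih =>
    intro n acc a h
    rw [Nat.toDigitsCore]
    by_cases hq : n / 10 = 0
    · have hlt : n < 10 := by omega
      rw [if_pos hq]
      simp only [List.foldl_cons]
      rw [digitChar_val (Nat.mod_lt n (by norm_num)), pvV_lt_ten hlt,
        pvLen_lt_ten hlt, Nat.mod_eq_of_lt hlt]
      ring_nf
    · rw [if_neg hq]
      have hn0 : n ≠ 0 := by omega
      have hrec : n / 10 < f := by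
        have := Nat.div_lt_self (Nat.pos_of_ne_zero hn0) (by norm_num : 1 < 10)
        omega
      rw [ih (n / 10) _ a hrec]
      simp only [List.foldl_cons]
      rw [digitChar_val (Nat.mod_lt n (by norm_num))]
      conv_rhs => rw [pvV_step hn0, pvLen_step (show ¬ n < 10 by omega), pow_succ]
      congr 1
      ring

lemma termary_alt_eq (m : Nat) : termary_alt (m : Int) = pvV m := by
  rw [termary_alt, PySem.Int.toChars, if_neg (by omega), Nat.toDigits, Int.toNat_natCast,
    foldl_toDigitsCore (m + 1) m [] 0 (by omega)]
  simp

lemma termaryLoop_eq (m : Nat) : ∀ (out n : Int), 0 ≤ n →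
    termaryLoop (m : Int) out n = out + 3 ^ n.toNat * pvV m := by
  induction m using Nat.strong_induction_on with
  | _ m ih =>
    intro out n hn
    rcases Nat.eq_zero_or_pos m with h0 | h0
    · subst h0
      rw [termaryLoop, pvV]
      simp
    · rw [termaryLoop, dif_neg (by omega), dif_neg (by omega)]
      rw [PySem.Int.floordiv_eq_ediv_of_pos (by norm_num), PySem.Int.mod_eq_emod_of_pos (by norm_num)]
      have h1 : ((m : Int)) / 10 = ((m / 10 : Nat) : Int) := by omega
      have h2 : ((m : Int)) % 10 = ((m % 10 : Nat) : Int) := by omega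
      rw [h1, h2, ih (m / 10) (Nat.div_lt_self h0 (by norm_num)) _ (n + 1) (by omega)]
      conv_rhs => rw [pvV_step (show m ≠ 0 by omega)]
      have h3 : (n + 1).toNat = n.toNat + 1 := by omega
      rw [h3, pow_succ]
      ring

-- ===== VERDICT (by name: the statement is the Claim_ definition above) =====
theorem termary_spec : Claim_equal_termary := by
  intro num _hdom hpre
  have hm : num = (num.toNat : Int) := by
    unfold Pre_termary at hpre; omega
  unfold Spec_termary termary
  rw [hm, termaryLoop_eq num.toNat 0 0 (by omega), termary_alt_eq]
  simp
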